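-- pv_equiv track=rewrite | github.com/paiml/depyler | examples/hard_data_structures.py | set_chain_operations
-- ===== SOURCE A (Python) =====
-- def set_chain_operations(a: set[int], b: set[int], c: set[int]) -> list[int]:
--     """Chain multiple set operations and collect results.
--
--     Tests: union, intersection, difference, symmetric_difference in sequence.
--     Returns sorted list of results for deterministic testing.
--     """
--     # (a | b) & c - gives elements in c that are also in a or b
--     union_ab: set[int] = set()
--     for x in a:
--         union_ab.add(x)
--     for x in b:
--         union_ab.add(x)
--
--     intersect_with_c: set[int] = set()
--     for x in union_ab:
--         if x in c:
--             intersect_with_c.add(x)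
--
--     # (a & b) - c - gives elements in both a and b but not in c
--     intersect_ab: set[int] = set()
--     for x in a:
--         if x in b:
--             intersect_ab.add(x)
--     diff_with_c: set[int] = set()
--     for x in intersect_ab:
--         if x not in c:
--             diff_with_c.add(x)
--
--     # Combine both results
--     combined: set[int] = set()
--     for x in intersect_with_c:
--         combined.add(x)
--     for x in diff_with_c:
--         combined.add(x)
--
--     # Sort for deterministic output
--     result: list[int] = []
--     for x in combined:
--         result.append(x)
--     result.sort()
--     return result
-- ===== SOURCE B (Python) =====
-- def set_chain_operations(a: set, b: set, c: set) -> list: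
--     """One classification pass: x is kept iff it lands in (a|b)&c or in (a&b)-c."""
--     pool = a | b | c
--     keep = {x for x in pool
--             if (x in c and (x in a or x in b)) or (x in a and x in b and x not in c)}
--     return sorted(keep)
-- ===== Notes on version B (the rewrite author's own statement) =====
-- stated objective: simpler
-- what changed: Replaces the five staged intermediate sets built by six sequential loops with a single predicate-driven classification pass over the union of the three inputs.
import Mathlib
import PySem

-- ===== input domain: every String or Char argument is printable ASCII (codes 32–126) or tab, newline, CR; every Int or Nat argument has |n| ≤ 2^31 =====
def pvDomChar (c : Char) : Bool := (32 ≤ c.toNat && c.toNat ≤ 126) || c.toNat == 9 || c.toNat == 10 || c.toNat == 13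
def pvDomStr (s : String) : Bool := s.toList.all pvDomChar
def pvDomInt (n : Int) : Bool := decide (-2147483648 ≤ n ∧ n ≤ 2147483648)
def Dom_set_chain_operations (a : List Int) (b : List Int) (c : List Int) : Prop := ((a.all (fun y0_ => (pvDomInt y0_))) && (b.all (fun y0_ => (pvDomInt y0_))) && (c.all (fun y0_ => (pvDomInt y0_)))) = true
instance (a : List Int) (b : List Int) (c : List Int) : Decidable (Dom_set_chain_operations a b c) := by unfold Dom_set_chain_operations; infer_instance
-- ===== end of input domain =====

-- B replaces A's six staged set-building loops with one membership-predicate pass over a|b|c (objective: simpler).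
-- A's Python iterates sets in hash order, but the result is sorted, so only set membership matters.

-- ===== PORT A =====
def set_chain_operations (a : List Int) (b : List Int) (c : List Int) : List Int :=
  let union_ab : PySem.Set Int :=
    b.foldl (fun s x => PySem.Set.add s x) (a.foldl (fun s x => PySem.Set.add s x) PySem.Set.empty)
  let intersect_with_c : PySem.Set Int :=
    union_ab.foldl (fun s x => if c.contains x then PySem.Set.add s x else s) PySem.Set.empty
  let intersect_ab : PySem.Set Int :=
    a.foldl (fun s x => if b.contains x then PySem.Set.add s x else s) PySem.Set.empty
  let diff_with_c : PySem.Set Int :=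
    intersect_ab.foldl (fun s x => if !(c.contains x) then PySem.Set.add s x else s) PySem.Set.empty
  let combined : PySem.Set Int :=
    diff_with_c.foldl (fun s x => PySem.Set.add s x)
      (intersect_with_c.foldl (fun s x => PySem.Set.add s x) PySem.Set.empty)
  let result : List Int := combined.foldl (fun r x => r ++ [x]) []
  PySem.List.sorted result (fun x => x) false

-- ===== PORT B =====
def set_chain_operations_alt (a : List Int) (b : List Int) (c : List Int) : List Int :=
  let pool : PySem.Set Int := PySem.Set.union (PySem.Set.union (PySem.Set.ofList a) b) c
  -- set comprehension over the Set pool = filter (pool is duplicate-free)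
  let keep : PySem.Set Int := pool.filter (fun x =>
    (c.contains x && (a.contains x || b.contains x)) ||
    (a.contains x && b.contains x && !(c.contains x)))
  PySem.List.sorted keep (fun x => x) false

-- ===== PRECONDITION & SPEC =====
def Spec_set_chain_operations (a : List Int) (b : List Int) (c : List Int) (out : List Int) : Prop := out = set_chain_operations_alt a b c
instance (a : List Int) (b : List Int) (c : List Int) (out : List Int) : Decidable (Spec_set_chain_operations a b c out) := by unfold Spec_set_chain_operations; infer_instance

-- ===== CLAIM (what is proved, stated in full; the proofs are below) =====
def Claim_equal_set_chain_operations : Prop := ∀ (a : List Int) (b : List Int) (c : List Int), Dom_set_chain_operations a b c → Spec_set_chain_operations a b c (set_chain_operations a b c)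

-- ===== LEMMAS AND PROOFS =====

-- 'for x in s: r.append(x)' starting from r = [] rebuilds s
lemma foldl_append_id (l acc : List Int) : l.foldl (fun r x => r ++ [x]) acc = acc ++ l := by
  induction l generalizing acc with
  | nil => simp
  | cons x xs ih => simp [List.foldl, ih]

-- two duplicate-free lists with the same members have the same sorted order
lemma sorted_eq_of_mem_iff (X Y : List Int) (hX : X.Nodup) (hY : Y.Nodup)
    (h : ∀ z, z ∈ X ↔ z ∈ Y) :
    PySem.List.sorted X (fun x => x) false = PySem.List.sorted Y (fun x => x) false := by
  have hperm : (PySem.List.sorted X (fun x => x) false).Perm X := PySem.List.sorted_perm ..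
  have hpermY : (PySem.List.sorted X (fun x => x) false).Perm Y :=
    hperm.trans ((List.perm_ext_iff_of_nodup hX hY).2 h)
  have hnd : (PySem.List.sorted X (fun x => x) false).Nodup := hperm.nodup_iff.2 hX
  have hle : (PySem.List.sorted X (fun x => x) false).Pairwise (fun u v : Int => u ≤ v) :=
    PySem.List.sorted_pairwise ..
  have hlt : (PySem.List.sorted X (fun x => x) false).Pairwise (fun u v : Int => u < v) :=
    (hle.and hnd).imp (fun ⟨h1, h2⟩ => lt_of_le_of_ne h1 h2)
  exact (PySem.List.sorted_eq_of_perm_of_pairwise_lt _ _ _ hpermY hlt).symm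

theorem set_chain_ab_eq (a b c : List Int) :
    set_chain_operations a b c = set_chain_operations_alt a b c := by
  unfold set_chain_operations set_chain_operations_alt
  simp only [PySem.List.foldl_if_eq_foldl_filter, foldl_append_id, List.nil_append]
  have hrw : ∀ (l : List Int) (s : PySem.Set Int),
      l.foldl (fun s x => PySem.Set.add s x) s = PySem.Set.update s l := fun _ _ => rfl
  simp only [hrw]
  apply sorted_eq_of_mem_iff
  · exact PySem.Set.nodup_update _ _ (PySem.Set.nodup_ofList _)
  · exact List.Nodup.filter _
      (PySem.Set.nodup_union _ c (PySem.Set.nodup_union _ b (PySem.Set.nodup_ofList a)))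
  · intro z
    simp only [PySem.Set.mem_update, PySem.Set.mem_ofList, List.mem_filter,
      PySem.Set.mem_union, PySem.Set.empty, List.not_mem_nil, false_or,
      List.contains_iff_mem, Bool.or_eq_true, Bool.and_eq_true, Bool.not_eq_true']
    constructor
    · rintro (⟨⟨hz | hz, _⟩, hc⟩ | ⟨⟨hza, hzb⟩, hc⟩) <;> tauto
    · rintro ⟨hpool, hz | hz⟩ <;> tauto

-- ===== VERDICT (by name: the statement is the Claim_ definition above) =====
theorem set_chain_operations_spec : Claim_equal_set_chain_operations := by
  intro a b c _
  unfold Spec_set_chain_operations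
  exact set_chain_ab_eq a b c
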